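-- pv_equiv track=rewrite | github.com/Arpitpatel1771/fampay-backend-assignment | server/Index/index.py | extractTokensFromString
-- ===== SOURCE A (Python) =====
-- import string
--
-- def extractTokensFromString(str) -> list[str]:
--     str = str.lower()
--
--     # Allowed Characters are [a-z],[A-Z] & [0-9] only
--     allowed_characters_for_tokenization = string.ascii_lowercase + string.digits + ' '
--
--     for character in str:
--         if character not in allowed_characters_for_tokenization:
--             str = str.replace(character, ' ')
--
--     tokens = str.split(' ')
--
--     # Remove empty/useless tokens
--     tokens = [token for token in tokens if token and token != '']
--
--     # Remove duplicates
--     tokens = list(dict.fromkeys(tokens))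
--
--     return tokens
-- ===== SOURCE B (Python) =====
-- import string
--
-- def extractTokensFromString(str) -> list[str]:
--     # Single left-to-right pass: buffer alphanumeric runs, flush at separators,
--     # dedup on the fly with a seen-set.
--     alnum = set(string.ascii_lowercase + string.digits)
--     result = []
--     seen = set()
--     buf = []
--     for ch in str.lower():
--         if ch in alnum:
--             buf.append(ch)
--         else:
--             if buf:
--                 tok = ''.join(buf)
--                 if tok not in seen:
--                     seen.add(tok)
--                     result.append(tok)
--                 buf = []
--     if buf:
--         tok = ''.join(buf)
--         if tok not in seen:
--             result.append(tok)
--     return result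
-- ===== Notes on version B (the rewrite author's own statement) =====
-- stated objective: alternative
-- what changed: A lowercases, then for each character calls a full-string replace to blank out disallowed characters, splits on spaces, filters empties and dedups via dict.fromkeys; B does one left-to-right pass over the lowered string, buffering alphanumeric runs and emitting each unseen token immediately using a seen-set.
import Mathlib
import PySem

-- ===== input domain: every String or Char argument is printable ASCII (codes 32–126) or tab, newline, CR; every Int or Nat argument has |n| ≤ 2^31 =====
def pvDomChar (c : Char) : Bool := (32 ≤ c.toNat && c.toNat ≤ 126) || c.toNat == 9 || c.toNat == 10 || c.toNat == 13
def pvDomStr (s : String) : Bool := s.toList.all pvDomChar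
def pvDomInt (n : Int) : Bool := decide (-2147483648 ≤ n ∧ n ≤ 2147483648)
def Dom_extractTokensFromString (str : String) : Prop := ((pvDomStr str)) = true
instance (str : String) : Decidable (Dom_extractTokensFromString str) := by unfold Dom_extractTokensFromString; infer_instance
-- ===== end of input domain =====

-- B replaces A's replace/split/filter/dedup pipeline by a single left-to-right pass
-- with a token buffer and a seen-set (alternative decomposition, same return value).


-- ===== PORT A =====
-- string.ascii_lowercase + string.digits + ' '
def pvAllowedA : String := "abcdefghijklmnopqrstuvwxyz0123456789 "

def extractTokensFromString (str : String) : List String :=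
  let s0 := PySem.Str.lower str
  -- for character in str: if character not in allowed: str = str.replace(character, ' ')
  let s1 := s0.toList.foldl
    (fun (t : String) (c : Char) =>
      if !(PySem.Str.isIn (String.ofList [c]) pvAllowedA) then
        PySem.Str.replace t (String.ofList [c]) " "
      else t) s0
  -- tokens = str.split(' ')
  let tokens := (PySem.Chars.splitOn s1.toList " ".toList).map String.ofList
  -- tokens = [token for token in tokens if token and token != '']
  let tokens := tokens.filter (fun t => t != "")
  -- list(dict.fromkeys(tokens))
  PySem.List.dedup tokens

-- ===== PORT B =====
-- set(string.ascii_lowercase + string.digits)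
def pvAlnumB : PySem.Set Char := PySem.Set.ofList "abcdefghijklmnopqrstuvwxyz0123456789".toList

-- one loop iteration of B, on the state (result, seen, buf)
def pvStepB (st : List String × PySem.Set String × List Char) (c : Char) :
    List String × PySem.Set String × List Char :=
  let (result, seen, buf) := st
  if PySem.Set.contains pvAlnumB c then (result, seen, buf ++ [c])
  else if buf.isEmpty then (result, seen, buf)
  else
    let tok := String.ofList buf
    if PySem.Set.contains seen tok then (result, seen, [])
    else (result ++ [tok], PySem.Set.add seen tok, [])

-- B's final flush after the loop
def pvFlushB (st : List String × PySem.Set String × List Char) : List String :=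
  let (result, seen, buf) := st
  if buf.isEmpty then result
  else
    let tok := String.ofList buf
    if PySem.Set.contains seen tok then result else result ++ [tok]

def extractTokensFromString_alt (str : String) : List String :=
  pvFlushB ((PySem.Str.lower str).toList.foldl pvStepB ([], PySem.Set.empty, []))

-- ===== PRECONDITION & SPEC =====
def Spec_extractTokensFromString (str : String) (out : List String) : Prop := out = extractTokensFromString_alt str
instance (str : String) (out : List String) : Decidable (Spec_extractTokensFromString str out) := by unfold Spec_extractTokensFromString; infer_instance

-- ===== CLAIM (what is proved, stated in full; the proofs are below) =====
def Claim_equal_extractTokensFromString : Prop := ∀ (str : String), Dom_extractTokensFromString str → Spec_extractTokensFromString str (extractTokensFromString str)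

-- ===== LEMMAS AND PROOFS =====

def pvAllowedL : List Char := pvAllowedA.toList
def pvAlnumL : List Char := "abcdefghijklmnopqrstuvwxyz0123456789".toList

theorem pvAllowed_split : pvAllowedL = pvAlnumL ++ [' '] := by decide
theorem pvSpace_not_alnum : ' ' ∉ pvAlnumL := by decide

-- substituting one character by a space
def pvSubst (c x : Char) : Char := if x == c then ' ' else x

-- the normalisation A's replace loop performs on the characters it iterates over
def pvNorm (x : Char) : Char := if x ∈ pvAllowedL then x else ' '

-- canonical split-at-spaces (cur is the reversed current chunk), mirrors splitOn.go
def pvSplitCh : List Char → List Char → List (List Char)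
  | [], cur => [cur.reverse]
  | c :: t, cur => if ' ' == c then cur.reverse :: pvSplitCh t [] else pvSplitCh t (c :: cur)

-- canonical tokens of the raw (lowered) character list: alnum runs, empties dropped
def pvToks (buf : List Char) : List Char → List String
  | [] => if buf.isEmpty then [] else [String.ofList buf]
  | c :: t =>
    if c ∈ pvAlnumL then pvToks (buf ++ [c]) t
    else if buf.isEmpty then pvToks buf t
    else String.ofList buf :: pvToks [] t

theorem pv_isIn_char (c : Char) :
    PySem.Str.isIn (String.ofList [c]) pvAllowedA = decide (c ∈ pvAllowedL) := by
  apply Bool.eq_iff_iff.mpr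
  rw [PySem.Str.isIn_iff_infix]
  simp [String.toList_ofList, List.singleton_infix_iff, pvAllowedL]

theorem pv_replace_go (c : Char) (fuel : Nat) :
    ∀ (l acc : List Char), l.length ≤ fuel →
      PySem.Chars.replace.go [c] [' '] fuel l acc = acc.reverse ++ l.map (pvSubst c) := by
  induction fuel with
  | zero =>
    intro l acc h
    have : l = [] := List.length_eq_zero_iff.mp (Nat.le_zero.mp h)
    subst this; simp [PySem.Chars.replace.go]
  | succ n ih =>
    intro l acc h
    cases l with
    | nil => simp [PySem.Chars.replace.go]
    | cons x t =>
      simp only [PySem.Chars.replace.go, List.isPrefixOf, Bool.and_true]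
      by_cases hx : c == x
      · simp only [hx]
        rw [ih _ _ (by simpa using Nat.le_of_succ_le_succ h)]
        simp [pvSubst, List.map_cons]
        have : x = c := (beq_iff_eq.mp hx).symm
        simp [this]
      · simp only [hx]
        rw [if_neg (by simpa using hx)]
        rw [ih _ _ (by simpa using Nat.le_of_succ_le_succ h)]
        have : pvSubst c x = x := by
          simp [pvSubst]; intro hxc; exact absurd (by simp [hxc]) hx
        simp [this]

theorem pv_replace (c : Char) (l : List Char) :
    PySem.Chars.replace l [c] [' '] = l.map (pvSubst c) := by
  unfold PySem.Chars.replace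
  simp only [List.isEmpty_cons, Bool.false_eq_true, if_false]
  rw [pv_replace_go c l.length l [] (le_refl _)]
  simp

-- the whole replace loop, over an arbitrary iteration list R
theorem pv_fold_replace (R : List Char) :
    ∀ (s : String),
      (R.foldl (fun (t : String) (c : Char) =>
        if !(PySem.Str.isIn (String.ofList [c]) pvAllowedA) then
          PySem.Str.replace t (String.ofList [c]) " "
        else t) s).toList
      = s.toList.map (fun x => if x ∈ pvAllowedL then x else if x ∈ R then ' ' else x) := by
  induction R with
  | nil =>
    intro s
    have he : (fun (x : Char) => if x ∈ pvAllowedL then x else if x ∈ ([] : List Char) then ' ' else x)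
        = fun x => x := by
      funext x; by_cases hx : x ∈ pvAllowedL <;> simp [hx]
    simp [he]
  | cons c R ih =>
    intro s
    simp only [List.foldl_cons]
    rw [ih]
    by_cases hc : c ∈ pvAllowedL
    · rw [pv_isIn_char]
      simp only [hc, decide_true, Bool.not_true, Bool.false_eq_true, if_false]
      apply List.map_congr_left
      intro x _
      by_cases hx : x ∈ pvAllowedL
      · simp [hx]
      · have hxc : x ≠ c := fun h => hx (h ▸ hc)
        simp [hx, hxc]
    · rw [pv_isIn_char]
      simp only [hc, decide_false, Bool.not_false, if_true]
      have hrep : (PySem.Str.replace s (String.ofList [c]) " ").toList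
          = s.toList.map (pvSubst c) := by
        rw [PySem.Str.toList_replace]
        rw [show (" " : String).toList = [' '] from by decide, String.toList_ofList]
        exact pv_replace c s.toList
      rw [hrep, List.map_map]
      apply List.map_congr_left
      intro x _
      simp only [Function.comp_apply, pvSubst]
      by_cases hxc : x = c
      · subst hxc
        have hsp : ' ' ∈ pvAllowedL := by decide
        simp [hc, hsp]
      · have hb : (x == c) = false := by simp [hxc]
        simp only [hb, Bool.false_eq_true, if_false]
        by_cases hx : x ∈ pvAllowedL
        · simp [hx]
        · simp [hx, hxc]

theorem pv_splitOn_go (fuel : Nat) :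
    ∀ (l cur : List Char) (acc : List (List Char)), l.length ≤ fuel →
      PySem.Chars.splitOn.go [' '] fuel l cur acc = acc.reverse ++ pvSplitCh l cur := by
  induction fuel with
  | zero =>
    intro l cur acc h
    have : l = [] := List.length_eq_zero_iff.mp (Nat.le_zero.mp h)
    subst this; simp [PySem.Chars.splitOn.go, pvSplitCh]
  | succ n ih =>
    intro l cur acc h
    cases l with
    | nil => simp [PySem.Chars.splitOn.go, pvSplitCh]
    | cons x t =>
      simp only [PySem.Chars.splitOn.go, List.isPrefixOf, Bool.and_true, pvSplitCh]
      by_cases hx : ' ' == x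
      · rw [if_pos hx, if_pos hx, ih _ _ _ (by simpa using Nat.le_of_succ_le_succ h)]
        simp
      · rw [if_neg hx, if_neg hx, ih _ _ _ (by simpa using Nat.le_of_succ_le_succ h)]

theorem pv_splitOn (l : List Char) :
    PySem.Chars.splitOn l [' '] = pvSplitCh l [] := by
  unfold PySem.Chars.splitOn
  rw [pv_splitOn_go (l.length + 1) l [] [] (by omega)]
  simp

theorem pv_filter_str :
    (fun (t : String) => t != "") ∘ String.ofList = fun (x : List Char) => !x.isEmpty := by
  funext x
  cases x with
  | nil => simp [String.ofList_nil]
  | cons a l =>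
    have h : String.ofList (a :: l) ≠ "" := by
      intro he
      have := congrArg String.toList he
      simp at this
    simp [h]

-- nonempty chunks of the normalised list are exactly the alnum-run tokens
theorem pv_filter_split (L : List Char) :
    ∀ (cur : List Char),
      ((pvSplitCh (L.map pvNorm) cur).filter (fun x => !x.isEmpty)).map String.ofList
        = pvToks cur.reverse L := by
  induction L with
  | nil =>
    intro cur
    cases h : cur.reverse with
    | nil => simp [pvSplitCh, pvToks, h, List.filter]
    | cons a l => simp [pvSplitCh, pvToks, h, List.filter]
  | cons c t ih =>
    intro cur
    by_cases hc : c ∈ pvAlnumL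
    · have hceq : pvNorm c = c := by
        have h1 : c ∈ pvAllowedL := pvAllowed_split ▸ List.mem_append_left _ hc
        simp [pvNorm, h1]
      have hcs : (' ' == c) = false := by
        have h2 : c ≠ ' ' := fun he => pvSpace_not_alnum (he ▸ hc)
        simp; exact fun he => h2 he.symm
      simp only [List.map_cons, pvSplitCh, hceq, hcs, Bool.false_eq_true, if_false]
      have := ih (c :: cur)
      simp only [List.reverse_cons] at this
      rw [this]
      simp [pvToks, hc]
    · have hcs : (' ' == pvNorm c) = true := by
        have : pvNorm c = ' ' := by
          by_cases h1 : c ∈ pvAllowedL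
          · rcases List.mem_append.mp (pvAllowed_split ▸ h1 : c ∈ pvAlnumL ++ [' ']) with h | h
            · exact absurd h hc
            · simp at h; simp [pvNorm, h1, h]
          · simp [pvNorm, h1]
        simp [this]
      simp only [List.map_cons, pvSplitCh, hcs, if_true]
      cases hcur : cur.reverse with
      | nil =>
        simp only [List.filter_cons, hcur, List.isEmpty_nil, Bool.not_true, Bool.false_eq_true,
          if_false]
        have := ih []
        simp only [List.reverse_nil] at this
        rw [this]
        simp [pvToks, hc, hcur]
      | cons a l =>
        simp only [List.filter_cons, hcur, List.isEmpty_cons, Bool.not_false, if_true,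
          List.map_cons]
        have := ih []
        simp only [List.reverse_nil] at this
        rw [this]
        simp [pvToks, hc, hcur]

theorem pv_contains_mem {α : Type} [BEq α] [LawfulBEq α] (s : PySem.Set α) (x : α) :
    PySem.Set.contains s x = decide (x ∈ s) := by
  rw [PySem.Set.contains_eq_listContains]
  simp

theorem pv_alnumB_mem (c : Char) :
    PySem.Set.contains pvAlnumB c = decide (c ∈ pvAlnumL) := by
  rw [pv_contains_mem]
  apply Bool.eq_iff_iff.mpr
  simp [pvAlnumB, PySem.Set.mem_ofList, pvAlnumL]

-- B's loop invariant: from a state (res, res, buf) the rest of the run produces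
-- res.update(tokens of buf ++ rest), i.e. appends the still-unseen tokens in order
theorem pv_B_invariant (rest : List Char) :
    ∀ (res : List String) (buf : List Char),
      pvFlushB (rest.foldl pvStepB (res, res, buf)) = PySem.Set.update res (pvToks buf rest) := by
  induction rest with
  | nil =>
    intro res buf
    cases hb : buf.isEmpty
    · simp only [List.foldl_nil, pvFlushB, pvToks, hb, Bool.false_eq_true, if_false]
      rw [PySem.Set.update_cons, PySem.Set.update_nil, PySem.Set.add_eq_ite, pv_contains_mem]
      by_cases hm : String.ofList buf ∈ res <;> simp [hm]
    · simp [List.foldl_nil, pvFlushB, pvToks, hb, PySem.Set.update_nil]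
  | cons c t ih =>
    intro res buf
    simp only [List.foldl_cons]
    by_cases hc : c ∈ pvAlnumL
    · have hcb : PySem.Set.contains pvAlnumB c = true := by rw [pv_alnumB_mem]; simp [hc]
      simp only [pvStepB, hcb, if_true]
      rw [ih]
      simp [pvToks, hc]
    · have hcb : PySem.Set.contains pvAlnumB c = false := by rw [pv_alnumB_mem]; simp [hc]
      cases hb : buf.isEmpty
      · -- buf nonempty: flush the token
        simp only [pvStepB, hcb, Bool.false_eq_true, if_false, hb]
        by_cases hm : String.ofList buf ∈ res
        · have hcm : PySem.Set.contains res (String.ofList buf) = true := by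
            rw [pv_contains_mem]; simp [hm]
          simp only [hcm, if_true]
          have hadd : PySem.Set.add res (String.ofList buf) = res := PySem.Set.add_of_mem hm
          rw [show ((res, res, ([] : List Char)) :
                List String × PySem.Set String × List Char)
              = (PySem.Set.add res (String.ofList buf), PySem.Set.add res (String.ofList buf), [])
            from by rw [hadd]]
          rw [ih]
          simp only [pvToks, hc, hb, Bool.false_eq_true, if_false]
          rw [PySem.Set.update_cons]
        · have hcm : PySem.Set.contains res (String.ofList buf) = false := by
            rw [pv_contains_mem]; simp [hm]
          simp only [hcm, Bool.false_eq_true, if_false]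
          have hadd : PySem.Set.add res (String.ofList buf) = res ++ [String.ofList buf] :=
            PySem.Set.add_of_not_mem hm
          rw [show ((res ++ [String.ofList buf], PySem.Set.add res (String.ofList buf),
                ([] : List Char)) : List String × PySem.Set String × List Char)
              = (PySem.Set.add res (String.ofList buf), PySem.Set.add res (String.ofList buf), [])
            from by rw [hadd]]
          rw [ih]
          simp only [pvToks, hc, hb, Bool.false_eq_true, if_false]
          rw [PySem.Set.update_cons]
      · -- buf empty: the state is unchanged
        simp only [pvStepB, hcb, Bool.false_eq_true, if_false, hb, if_true]
        rw [ih]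
        simp [pvToks, hc, hb]

-- ===== VERDICT (by name: the statement is the Claim_ definition above) =====
theorem extractTokensFromString_spec : Claim_equal_extractTokensFromString := by
  unfold Claim_equal_extractTokensFromString
  intro str _
  unfold Spec_extractTokensFromString
  unfold extractTokensFromString extractTokensFromString_alt
  simp only []
  rw [pv_fold_replace]
  have hnorm :
      ((PySem.Str.lower str).toList.map
        (fun x => if x ∈ pvAllowedL then x
                  else if x ∈ (PySem.Str.lower str).toList then ' ' else x))
      = (PySem.Str.lower str).toList.map pvNorm := by
    apply List.map_congr_left
    intro x hx
    by_cases h : x ∈ pvAllowedL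
    · rw [if_pos h]; simp [pvNorm, h]
    · rw [if_neg h, if_pos hx]; simp [pvNorm, h]
  rw [hnorm]
  rw [show (" " : String).toList = [' '] from by decide]
  rw [pv_splitOn, List.filter_map, pv_filter_str]
  have hA := pv_filter_split (PySem.Str.lower str).toList []
  simp only [List.reverse_nil] at hA
  rw [hA]
  have hB := pv_B_invariant (PySem.Str.lower str).toList [] []
  rw [show (PySem.Set.empty : PySem.Set String) = [] from rfl, hB]
  rw [PySem.List.dedup_eq_ofList, PySem.Set.update_nil_left]
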